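-- pv_equiv track=rewrite | github.com/xwxing1229/LeetCode | Python3/0777_swap_adjacent_in_lr_string.py | canTransform
-- ===== SOURCE A (Python) =====
-- def canTransform(start, end):
--     """
--     Inputs:
--         start: str
--         end: str
--     Outputs:
--         res: bool
--     """
--
--     res = False
--     n = len(start)
--     if n != len(end):
--         return res
--
--     i, j = 0, 0
--     while (i < n) and (j < n):
--         while i < n and start[i] == "X":
--             i = i + 1
--         while j < n and end[j] == "X":
--             j = j + 1
--         if i == n or j == n:
--             break
--
--         if start[i] != end[j]:
--             return res
--         if start[i] == "L" and i < j:
--             return res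
--         if start[i] == "R" and i > j:
--             return res
--
--         i = i + 1
--         j = j + 1
--
--     if i == n:
--         for k in range(j, n):
--             if end[k] != "X":
--                 return res
--     else:
--         for k in range(i, n):
--             if start[k] != "X":
--                 return res
--     return True
-- ===== SOURCE B (Python) =====
-- def canTransform(start, end):
--     if len(start) != len(end):
--         return False
--     if [c for c in start if c != 'X'] != [c for c in end if c != 'X']:
--         return False
--     ls = le = rs = re = 0
--     for a, b in zip(start, end):
--         if a == 'L':
--             ls += 1
--         elif a == 'R':
--             rs += 1
--         if b == 'L':
--             le += 1
--         elif b == 'R':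
--             re += 1
--         if ls > le or rs < re:
--             return False
--     return True
-- ===== Notes on version B (the rewrite author's own statement) =====
-- stated objective: alternative
-- what changed: Replaces A's two-pointer walk that pairs up non-X characters and compares their indices by a count-based criterion: B checks the X-stripped sequences are equal and then makes one aligned pass keeping four running counters, requiring at every prefix that start has seen no more L's than end and no fewer R's (prefix-count dominance instead of index pairing).
import Mathlib
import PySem

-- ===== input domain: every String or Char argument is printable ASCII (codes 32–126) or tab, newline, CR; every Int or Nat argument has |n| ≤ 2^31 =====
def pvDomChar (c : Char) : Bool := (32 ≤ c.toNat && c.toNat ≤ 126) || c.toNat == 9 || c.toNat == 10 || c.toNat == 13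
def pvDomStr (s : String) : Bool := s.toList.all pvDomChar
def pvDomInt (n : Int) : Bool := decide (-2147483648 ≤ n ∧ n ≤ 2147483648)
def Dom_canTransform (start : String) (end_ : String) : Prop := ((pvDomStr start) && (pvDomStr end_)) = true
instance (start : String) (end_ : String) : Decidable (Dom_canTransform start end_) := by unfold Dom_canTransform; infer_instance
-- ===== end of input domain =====

-- B replaces A's two-pointer index pairing by a count-based criterion (equal X-stripped
-- sequences + prefix-count dominance of L/R in one aligned pass); objective: alternative.

-- ===== PORT A =====
-- inner 'while i < n and s[i] == "X": i += 1'
def skipX (s : List Char) (n i : Nat) : Nat :=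
  if h : i < n ∧ s.getD i ' ' = 'X' then skipX s n (i + 1) else i
termination_by n - i
decreasing_by omega

-- trailing 'for k in range(k, n): if s[k] != "X": return res' (res = False)
def tailX (s : List Char) (n k : Nat) : Bool :=
  if h : k < n then
    if s.getD k ' ' ≠ 'X' then false else tailX s n (k + 1)
  else true
termination_by n - k
decreasing_by omega

-- needed by loopA's termination proof
theorem skipX_ge (s : List Char) (n i : Nat) : i ≤ skipX s n i := by
  rw [skipX]
  split
  · exact Nat.le_trans (Nat.le_succ i) (skipX_ge s n (i + 1))
  · exact Nat.le_refl i
termination_by n - i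
decreasing_by omega

-- the main 'while (i < n) and (j < n)' loop of A, including the trailing check
def loopA (s e : List Char) (n i j : Nat) : Bool :=
  if hij : i < n ∧ j < n then
    if hb : skipX s n i = n ∨ skipX e n j = n then
      -- 'break' then the trailing for-loop
      if skipX s n i = n then tailX e n (skipX e n j) else tailX s n (skipX s n i)
    else
      if s.getD (skipX s n i) ' ' ≠ e.getD (skipX e n j) ' ' then false
      else if s.getD (skipX s n i) ' ' = 'L' ∧ skipX s n i < skipX e n j then false
      else if s.getD (skipX s n i) ' ' = 'R' ∧ skipX e n j < skipX s n i then false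
      else loopA s e n (skipX s n i + 1) (skipX e n j + 1)
  else
    if i = n then tailX e n j else tailX s n i
termination_by n - i
decreasing_by
  have h1 := skipX_ge s n i
  omega

def canTransform (start : String) (end_ : String) : Bool :=
  let s := start.toList
  let e := end_.toList
  let n := s.length
  if n ≠ e.length then false
  else loopA s e n 0 0

-- ===== PORT B =====
-- 'for a, b in zip(start, end): update four counters; fail on prefix-count violation'
def loopB : List (Char × Char) → Int → Int → Int → Int → Bool
  | [], _, _, _, _ => true
  | (a, b) :: rest, ls, le, rs, re =>
      let ls' := if a = 'L' then ls + 1 else ls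
      let rs' := if a = 'L' then rs else if a = 'R' then rs + 1 else rs
      let le' := if b = 'L' then le + 1 else le
      let re' := if b = 'L' then re else if b = 'R' then re + 1 else re
      if le' < ls' ∨ rs' < re' then false else loopB rest ls' le' rs' re'

def canTransform_alt (start : String) (end_ : String) : Bool :=
  let s := start.toList
  let e := end_.toList
  if s.length ≠ e.length then false
  else if s.filter (fun c => c != 'X') ≠ e.filter (fun c => c != 'X') then false
  else loopB (s.zip e) 0 0 0 0

-- ===== PRECONDITION & SPEC =====
def Spec_canTransform (start : String) (end_ : String) (out : Bool) : Prop := out = canTransform_alt start end_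
instance (start : String) (end_ : String) (out : Bool) : Decidable (Spec_canTransform start end_ out) := by unfold Spec_canTransform; infer_instance

-- ===== CLAIM (what is proved, stated in full; the proofs are below) =====
def Claim_equal_canTransform : Prop := ∀ (start : String) (end_ : String), Dom_canTransform start end_ → Spec_canTransform start end_ (canTransform start end_)

-- ===== LEMMAS AND PROOFS =====

-- skipX never passes n
theorem skipX_le (s : List Char) (n i : Nat) (h : i ≤ n) : skipX s n i ≤ n := by
  rw [skipX]
  split
  · next h2 => exact skipX_le s n (i + 1) h2.1
  · exact h
termination_by n - i
decreasing_by omega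

-- the filtered (index, char) pairs of s with index ≥ i
def pairsFrom (s : List Char) (i : Nat) : List (Int × Char) :=
  if h : i < s.length then
    if s.getD i ' ' = 'X' then pairsFrom s (i + 1)
    else ((i : Int), s.getD i ' ') :: pairsFrom s (i + 1)
  else []
termination_by s.length - i
decreasing_by all_goals omega

-- checker A's loop reduces to: walk the two pair lists in step
def fB : List (Int × Char) → List (Int × Char) → Bool
  | [], [] => true
  | [], _ :: _ => false
  | _ :: _, [] => false
  | (i, cs) :: ps, (j, ce) :: qs =>
      if cs ≠ ce then false
      else if cs = 'L' ∧ i < j then false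
      else if cs = 'R' ∧ j < i then false
      else fB ps qs

theorem fB_nil_left (qs : List (Int × Char)) : fB [] qs = qs.isEmpty := by
  cases qs <;> rfl

theorem fB_nil_right (ps : List (Int × Char)) : fB ps [] = ps.isEmpty := by
  cases ps with
  | nil => rfl
  | cons p ps => obtain ⟨i, c⟩ := p; rfl

theorem pairsFrom_stop (s : List Char) (k : Nat) (h : s.length ≤ k) : pairsFrom s k = [] := by
  rw [pairsFrom]
  simp [Nat.not_lt.mpr h]

theorem skipX_pairs (s : List Char) (n : Nat) (h : n = s.length) (i : Nat) :
    pairsFrom s (skipX s n i) = pairsFrom s i := by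
  subst h
  rw [skipX]
  split
  · next h =>
    rw [skipX_pairs s s.length rfl (i + 1)]
    conv_rhs => rw [pairsFrom]
    rw [dif_pos h.1, if_pos h.2]
  · rfl
termination_by s.length - i
decreasing_by omega

theorem skipX_stop (s : List Char) (n i : Nat) :
    ¬ (skipX s n i < n ∧ s.getD (skipX s n i) ' ' = 'X') := by
  rw [skipX]
  split
  · exact skipX_stop s n (i + 1)
  · next h => exact h
termination_by n - i
decreasing_by omega

theorem tailX_isEmpty (s : List Char) (n k : Nat) (hn : n = s.length) :
    tailX s n k = (pairsFrom s k).isEmpty := by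
  subst hn
  by_cases h : k < s.length
  · by_cases hx : s.getD k ' ' = 'X'
    · rw [tailX, dif_pos h, if_neg (not_not_intro hx), pairsFrom, dif_pos h, if_pos hx]
      exact tailX_isEmpty s s.length (k + 1) rfl
    · rw [tailX, dif_pos h, if_pos hx, pairsFrom, dif_pos h, if_neg hx]
      simp
  · rw [tailX, dif_neg h, pairsFrom, dif_neg h]
    simp
termination_by s.length - k
decreasing_by omega

theorem loopA_eq (s e : List Char) (n : Nat) (hs : n = s.length) (he : n = e.length)
    (i j : Nat) (hi : i ≤ n) (hj : j ≤ n) :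
    loopA s e n i j = fB (pairsFrom s i) (pairsFrom e j) := by
  rw [loopA]
  split
  · next hij =>
    have hgi := skipX_ge s n i
    have hli := skipX_le s n i (Nat.le_of_lt hij.1)
    have hgj := skipX_ge e n j
    have hlj := skipX_le e n j (Nat.le_of_lt hij.2)
    have hpi : pairsFrom s (skipX s n i) = pairsFrom s i := skipX_pairs s n hs i
    have hpj : pairsFrom e (skipX e n j) = pairsFrom e j := skipX_pairs e n he j
    rw [← hpi, ← hpj]
    split
    · next hb =>
      by_cases hbn : skipX s n i = n
      · rw [if_pos hbn, hbn, pairsFrom_stop s n (by omega), fB_nil_left]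
        exact tailX_isEmpty e n (skipX e n j) he
      · rw [if_neg hbn]
        have hjn : skipX e n j = n := by tauto
        rw [hjn, pairsFrom_stop e n (by omega), fB_nil_right]
        exact tailX_isEmpty s n (skipX s n i) hs
    · next hb =>
      have hin : skipX s n i < n := by omega
      have hjn : skipX e n j < n := by omega
      have hxs : s.getD (skipX s n i) ' ' ≠ 'X' := by
        have := skipX_stop s n i; tauto
      have hxe : e.getD (skipX e n j) ' ' ≠ 'X' := by
        have := skipX_stop e n j; tauto
      have hcs : pairsFrom s (skipX s n i) =
          ((skipX s n i : Int), s.getD (skipX s n i) ' ') :: pairsFrom s (skipX s n i + 1) := by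
        rw [pairsFrom, dif_pos (by omega : skipX s n i < s.length), if_neg hxs]
      have hce : pairsFrom e (skipX e n j) =
          ((skipX e n j : Int), e.getD (skipX e n j) ' ') :: pairsFrom e (skipX e n j + 1) := by
        rw [pairsFrom, dif_pos (by omega : skipX e n j < e.length), if_neg hxe]
      rw [hcs, hce, fB]
      simp only [Nat.cast_lt]
      split_ifs
      · rfl
      · rfl
      · rfl
      · exact loopA_eq s e n hs he (skipX s n i + 1) (skipX e n j + 1) (by omega) (by omega)
  · next hij =>
    by_cases hin : i = n
    · rw [if_pos hin, hin, pairsFrom_stop s n (by omega), fB_nil_left]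
      exact tailX_isEmpty e n j he
    · rw [if_neg hin]
      have hjn : j = n := by omega
      rw [hjn, pairsFrom_stop e n (by omega), fB_nil_right]
      exact tailX_isEmpty s n i hs
termination_by n - i
decreasing_by
  omega

----------------------------------------------------------------
-- bridge pairsFrom to the enumerate-filter form and to occurrence lists
----------------------------------------------------------------

theorem pairsFrom_suffix (s : List Char) (i : Nat) :
    pairsFrom s i = (PySem.List.enumerate (s.drop i) (i : Int)).filter (fun p => p.2 != 'X') := by
  rw [pairsFrom]
  split
  · next h =>
    rw [List.drop_eq_getElem_cons h, PySem.List.enumerate_cons]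
    have hd : s.getD i ' ' = s[i] := List.getD_eq_getElem s ' ' h
    rw [pairsFrom_suffix s (i + 1)]
    by_cases hx : s.getD i ' ' = 'X'
    · rw [if_pos hx]
      have : s[i] = 'X' := by rw [← hd]; exact hx
      simp [this]
    · rw [if_neg hx]
      have : (s[i] != 'X') = true := by rw [← hd]; simpa using hx
      simp [this, List.getElem?_eq_getElem h]
  · next h =>
    rw [List.drop_eq_nil_of_le (by omega)]
    simp [PySem.List.enumerate]
termination_by s.length - i
decreasing_by omega

-- pairs of a string, enumerate form
def pairsE (s : List Char) : List (Int × Char) :=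
  (PySem.List.enumerate s 0).filter (fun p => p.2 != 'X')

theorem pairsFrom_zero (s : List Char) : pairsFrom s 0 = pairsE s := by
  simpa [pairsE] using pairsFrom_suffix s 0

theorem enum_succ (s : List Char) (k : Int) :
    PySem.List.enumerate s (k + 1) = (PySem.List.enumerate s k).map (fun p => (p.1 + 1, p.2)) := by
  induction s generalizing k with
  | nil => simp [PySem.List.enumerate]
  | cons a s ih =>
    rw [PySem.List.enumerate_cons, PySem.List.enumerate_cons, List.map_cons, ih (k + 1)]

theorem pairsE_cons (a : Char) (s : List Char) :
    pairsE (a :: s) =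
      (if a = 'X' then [] else [((0 : Int), a)]) ++ (pairsE s).map (fun p => (p.1 + 1, p.2)) := by
  unfold pairsE
  rw [PySem.List.enumerate_cons, List.filter_cons]
  rw [show (0 : Int) + 1 = 1 by ring] at *
  rw [show PySem.List.enumerate s 1 = (PySem.List.enumerate s 0).map (fun p => (p.1 + 1, p.2)) by
        simpa using enum_succ s 0]
  rw [List.filter_map]
  by_cases hx : a = 'X'
  · simp [hx, Function.comp_def]
  · simp [hx, Function.comp_def]

-- occurrence indices of char c in a pair list (start side)
def oc (c : Char) (ps : List (Int × Char)) : List Int :=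
  ps.filterMap (fun p => if p.2 = c then some p.1 else none)

-- occurrence indices of char c in a string, relative form
def occ (c : Char) : List Char → List Int
  | [] => []
  | a :: s => if a = c then (0 : Int) :: (occ c s).map (· + 1) else (occ c s).map (· + 1)

theorem oc_pairsE (c : Char) (hc : c ≠ 'X') (s : List Char) : oc c (pairsE s) = occ c s := by
  induction s with
  | nil => simp [oc, pairsE, PySem.List.enumerate, occ]
  | cons a s ih =>
    rw [pairsE_cons]
    unfold oc occ
    rw [List.filterMap_append, List.filterMap_map]
    have hmap : List.filterMap ((fun p : Int × Char => if p.2 = c then some p.1 else none) ∘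
        (fun p : Int × Char => (p.1 + 1, p.2))) (pairsE s) =
        (oc c (pairsE s)).map (· + 1) := by
      rw [oc, List.map_filterMap]
      apply List.filterMap_congr
      intro p _
      by_cases h : p.2 = c <;> simp [h, Function.comp_def]
    rw [hmap, ih]
    by_cases hx : a = 'X'
    · have hac : a ≠ c := by rw [hx]; exact fun h => hc h.symm
      simp [hx, hac, Ne.symm hc]
    · by_cases hac : a = c
      · simp [hx, hac, hc]
      · simp [hx, hac, hc]

theorem snd_pairsE (s : List Char) :
    (pairsE s).map Prod.snd = s.filter (fun c => c != 'X') := by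
  induction s with
  | nil => simp [pairsE, PySem.List.enumerate]
  | cons a s ih =>
    rw [pairsE_cons, List.map_append, List.map_map, List.filter_cons]
    by_cases hx : a = 'X'
    · simp [hx, Function.comp_def, ← ih, pairsE]
    · simp [hx, Function.comp_def, ← ih, pairsE]

theorem oc_cons (c : Char) (i : Int) (cs : Char) (ps : List (Int × Char)) :
    oc c ((i, cs) :: ps) = if cs = c then i :: oc c ps else oc c ps := by
  unfold oc
  rw [List.filterMap_cons]
  by_cases h : cs = c <;> simp [h]

-- fB characterised: equal char sequences + pointwise index dominance on L and R occurrences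
theorem fB_iff_full (ps qs : List (Int × Char)) :
    fB ps qs = true ↔
      (ps.map Prod.snd = qs.map Prod.snd ∧
       List.Forall₂ (fun p q : Int => q ≤ p) (oc 'L' ps) (oc 'L' qs) ∧
       List.Forall₂ (fun p q : Int => p ≤ q) (oc 'R' ps) (oc 'R' qs)) := by
  induction ps generalizing qs with
  | nil =>
    cases qs with
    | nil => simp [fB, oc]
    | cons q qs => simp [fB]
  | cons p ps ih =>
    obtain ⟨i, cs⟩ := p
    cases qs with
    | nil => simp [fB_nil_right]
    | cons q qs =>
      obtain ⟨j, ce⟩ := q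
      rw [fB, oc_cons, oc_cons, oc_cons, oc_cons]
      by_cases h1 : cs = ce
      · subst h1
        rw [if_neg (not_not_intro rfl)]
        by_cases h2 : cs = 'L' ∧ i < j
        · obtain ⟨rfl, hij⟩ := h2
          rw [if_pos ⟨rfl, hij⟩]
          rw [if_pos rfl, if_pos rfl, if_neg (by decide : ('L' : Char) ≠ 'R'),
            if_neg (by decide : ('L' : Char) ≠ 'R')]
          constructor
          · intro h; exact absurd h (by simp)
          · rintro ⟨-, hF, -⟩
            rcases hF with _ | ⟨hqp, -⟩
            exact absurd hqp (by omega)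
        · rw [if_neg h2]
          by_cases h3 : cs = 'R' ∧ j < i
          · obtain ⟨rfl, hij⟩ := h3
            rw [if_pos ⟨rfl, hij⟩]
            rw [if_pos rfl, if_pos rfl, if_neg (by decide : ('R' : Char) ≠ 'L'),
              if_neg (by decide : ('R' : Char) ≠ 'L')]
            constructor
            · intro h; exact absurd h (by simp)
            · rintro ⟨-, -, hF⟩
              rcases hF with _ | ⟨hqp, -⟩
              exact absurd hqp (by omega)
          · rw [if_neg h3, ih qs]
            by_cases hL : cs = 'L'
            · subst hL
              have hji : j ≤ i := by
                rcases Int.lt_or_le i j with h | h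
                · exact absurd ⟨rfl, h⟩ h2
                · omega
              rw [if_pos rfl, if_pos rfl, if_neg (by decide : ('L' : Char) ≠ 'R'),
                if_neg (by decide : ('L' : Char) ≠ 'R')]
              constructor
              · rintro ⟨hm, hFL, hFR⟩
                exact ⟨by simp [hm], List.Forall₂.cons hji hFL, hFR⟩
              · rintro ⟨hm, hFL, hFR⟩
                rcases hFL with _ | ⟨-, hFL⟩
                exact ⟨by simpa using hm, hFL, hFR⟩
            · rw [if_neg hL, if_neg hL]
              by_cases hR : cs = 'R'
              · subst hR
                have hji : i ≤ j := by
                  rcases Int.lt_or_le j i with h | h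
                  · exact absurd ⟨rfl, h⟩ h3
                  · omega
                rw [if_pos rfl, if_pos rfl]
                constructor
                · rintro ⟨hm, hFL, hFR⟩
                  exact ⟨by simp [hm], hFL, List.Forall₂.cons hji hFR⟩
                · rintro ⟨hm, hFL, hFR⟩
                  rcases hFR with _ | ⟨-, hFR⟩
                  exact ⟨by simpa using hm, hFL, hFR⟩
              · rw [if_neg hR, if_neg hR]
                constructor
                · rintro ⟨hm, hFL, hFR⟩
                  exact ⟨by simp [hm], hFL, hFR⟩
                · rintro ⟨hm, hFL, hFR⟩
                  exact ⟨by simpa using hm, hFL, hFR⟩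
      · rw [if_pos h1]
        constructor
        · intro h; exact absurd h (by simp)
        · rintro ⟨hm, -⟩
          simp only [List.map_cons, List.cons.injEq] at hm
          exact absurd hm.1 h1

----------------------------------------------------------------
-- the count/occurrence duality
----------------------------------------------------------------

theorem forall₂_countP (u v : List Int)
    (hF : List.Forall₂ (fun p q : Int => q ≤ p) u v) (i : Int) :
    u.countP (fun x => decide (x < i)) ≤ v.countP (fun x => decide (x < i)) := by
  induction hF with
  | nil => simp
  | @cons p q u' v' hpq hF ih =>
    simp only [List.countP_cons]
    by_cases hpi : p < i
    · have hqi : q < i := by omega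
      simp [hpi, hqi]
      omega
    · by_cases hqi : q < i
      · simp [hpi, hqi]
        omega
      · simp [hpi, hqi]
        omega

theorem countP_forall₂ (u v : List Int)
    (hu : u.Pairwise (· < ·)) (hv : v.Pairwise (· < ·)) (hlen : u.length = v.length)
    (h : ∀ i : Int, u.countP (fun x => decide (x < i)) ≤ v.countP (fun x => decide (x < i))) :
    List.Forall₂ (fun p q : Int => q ≤ p) u v := by
  induction u generalizing v with
  | nil =>
    cases v with
    | nil => exact List.Forall₂.nil
    | cons q v => simp at hlen
  | cons p u ihu =>
    cases v with
    | nil => simp at hlen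
    | cons q v =>
      have hqp : q ≤ p := by
        by_contra hqpn
        have hpq : p < q := by omega
        have h1 := h (p + 1)
        have hv0 : v.countP (fun x => decide (x < p + 1)) = 0 := by
          rw [List.countP_eq_zero]
          intro x hx
          have := (List.pairwise_cons.mp hv).1 x hx
          simp only [decide_eq_true_eq]
          omega
        have hA : p < p + 1 := by omega
        have hB : ¬ q < p + 1 := by omega
        simp only [List.countP_cons, hv0, decide_eq_true_eq] at h1
        simp [hA, hB] at h1
      refine List.Forall₂.cons hqp (ihu v (List.Pairwise.of_cons hu) (List.Pairwise.of_cons hv)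
        (by simpa using hlen) ?_)
      intro i
      by_cases hip : p < i
      · have hqi : q < i := by omega
        have h1 := h i
        simp only [List.countP_cons, decide_eq_true_eq] at h1
        simp [hip, hqi] at h1
        omega
      · have hu0 : u.countP (fun x => decide (x < i)) = 0 := by
          rw [List.countP_eq_zero]
          intro x hx
          have := (List.pairwise_cons.mp hu).1 x hx
          simp only [decide_eq_true_eq]
          omega
        rw [hu0]
        exact Nat.zero_le _

theorem occ_nonneg (c : Char) (s : List Char) : ∀ x ∈ occ c s, (0 : Int) ≤ x := by
  induction s with
  | nil => simp [occ]
  | cons a s ih =>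
    unfold occ
    split
    · intro x hx
      rcases List.mem_cons.mp hx with rfl | hx
      · omega
      · rcases List.mem_map.mp hx with ⟨y, hy, rfl⟩
        have := ih y hy; omega
    · intro x hx
      rcases List.mem_map.mp hx with ⟨y, hy, rfl⟩
      have := ih y hy; omega

theorem occ_pairwise (c : Char) (s : List Char) : (occ c s).Pairwise (· < ·) := by
  induction s with
  | nil => simp [occ]
  | cons a s ih =>
    unfold occ
    have hm : ((occ c s).map (· + 1)).Pairwise (· < ·) := by
      rw [List.pairwise_map]
      exact ih.imp (by intro a b h; omega)
    split
    · refine List.pairwise_cons.mpr ⟨?_, hm⟩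
      intro x hx
      rcases List.mem_map.mp hx with ⟨y, hy, rfl⟩
      have := occ_nonneg c s y hy; omega
    · exact hm

theorem occ_length (c : Char) (s : List Char) : (occ c s).length = s.count c := by
  induction s with
  | nil => simp [occ]
  | cons a s ih =>
    unfold occ
    by_cases h : a = c
    · simp [h, ih, List.count_cons]
    · simp [h, ih, List.count_cons]

theorem count_take (c : Char) (s : List Char) (m : Nat) :
    (s.take m).count c = (occ c s).countP (fun x => decide (x < (m : Int))) := by
  induction s generalizing m with
  | nil => simp [occ]
  | cons a s ih =>
    cases m with
    | zero =>
      simp only [List.take_zero, List.count_nil]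
      symm
      rw [List.countP_eq_zero]
      intro x hx
      have := occ_nonneg c (a :: s) x hx
      simp only [decide_eq_true_eq]
      omega
    | succ m =>
      have hmap : ((occ c s).map (· + 1)).countP (fun x => decide (x < ((m + 1 : Nat) : Int))) =
          (occ c s).countP (fun x => decide (x < (m : Int))) := by
        rw [List.countP_map]
        apply List.countP_congr
        intro x _
        simp only [Function.comp_apply, decide_eq_true_eq]
        push_cast
        omega
      rw [List.take_succ_cons, List.count_cons]
      unfold occ
      by_cases h : a = c
      · rw [if_pos h, List.countP_cons, hmap, ih]
        have e0 : (decide ((0 : Int) < ((m + 1 : Nat) : Int))) = true := by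
          simp only [decide_eq_true_eq]
          push_cast
          omega
        rw [e0]
        simp [h]
      · rw [if_neg h, hmap, ih]
        simp [h]

----------------------------------------------------------------
-- B's loop characterised by prefix counts
----------------------------------------------------------------

set_option maxHeartbeats 1000000 in
theorem loopB_iff (l : List (Char × Char)) (ls le rs re : Int) :
    loopB l ls le rs re = true ↔
      ∀ j : Nat, j < l.length →
        (ls + (((l.take (j + 1)).map Prod.fst).count 'L' : Int) ≤
           le + (((l.take (j + 1)).map Prod.snd).count 'L' : Int) ∧
         re + (((l.take (j + 1)).map Prod.snd).count 'R' : Int) ≤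
           rs + (((l.take (j + 1)).map Prod.fst).count 'R' : Int)) := by
  induction l generalizing ls le rs re with
  | nil => simp [loopB]
  | cons ab rest ih =>
    obtain ⟨a, b⟩ := ab
    simp only [loopB]
    by_cases hvio : (if b = 'L' then le + 1 else le) < (if a = 'L' then ls + 1 else ls) ∨
        (if a = 'L' then rs else if a = 'R' then rs + 1 else rs) <
        (if b = 'L' then re else if b = 'R' then re + 1 else re)
    · rw [if_pos hvio]
      constructor
      · intro h; exact absurd h (by simp)
      · intro hR
        have h0 := hR 0 (by simp)
        exfalso
        revert h0 hvio
        simp only [List.take_succ_cons, List.take_zero, List.map_cons, List.map_nil,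
          List.count_cons, List.count_nil, beq_iff_eq]
        split_ifs <;> intros <;>
          (first | (exfalso; simp_all; done) | (push_cast at *; omega))
    · rw [if_neg hvio]
      rw [ih]
      rcases not_or.mp hvio with ⟨h1, h2⟩
      constructor
      · intro hR j hj
        cases j with
        | zero =>
          revert h1 h2
          simp only [List.take_succ_cons, List.take_zero, List.map_cons, List.map_nil,
            List.count_cons, List.count_nil, beq_iff_eq]
          split_ifs <;> intros <;>
            (first | (exfalso; simp_all; done) | (push_cast at *; omega))
        | succ k =>
          have hk := hR k (by simpa using hj)
          revert hk
          simp only [List.take_succ_cons, List.map_cons, List.count_cons, beq_iff_eq]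
          split_ifs <;> intros <;>
            (first | (exfalso; simp_all; done) | (push_cast at *; omega))
      · intro hR j hj
        have hk := hR (j + 1) (by simpa using Nat.succ_lt_succ hj)
        revert hk
        simp only [List.take_succ_cons, List.map_cons, List.count_cons, beq_iff_eq]
        split_ifs <;> intros <;>
          (first | (exfalso; simp_all; done) | (push_cast at *; omega))

-- prefix-count conditions over Int indices vs over string prefixes
theorem countP_nonpos (u : List Int) (hnn : ∀ x ∈ u, (0 : Int) ≤ x) (i : Int) (hi : i ≤ 0) :
    u.countP (fun x => decide (x < i)) = 0 := by
  rw [List.countP_eq_zero]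
  intro x hx
  have := hnn x hx
  simp only [decide_eq_true_eq]
  omega

theorem pvForall₂_swap (u v : List Int) :
    List.Forall₂ (fun p q : Int => p ≤ q) u v ↔ List.Forall₂ (fun p q : Int => q ≤ p) v u := by
  constructor <;>
    (intro h
     induction h with
     | nil => exact List.Forall₂.nil
     | cons h1 _ ih => exact List.Forall₂.cons h1 ih)

theorem count_filter_ne (c : Char) (hc : c ≠ 'X') (s : List Char) :
    (s.filter (fun d => d != 'X')).count c = s.count c := by
  induction s with
  | nil => rfl
  | cons a s ih =>
    rw [List.filter_cons]
    by_cases hx : a = 'X'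
    · have : a ≠ c := by rw [hx]; exact fun h => hc h.symm
      simp [hx, List.count_cons, this, ih, Ne.symm hc]
    · simp [hx, List.count_cons, ih]

-- the two prefix formulations agree
theorem intCond_iff_natCond (s e : List Char) (hlen : s.length = e.length) :
    ((∀ i : Int, (occ 'L' s).countP (fun x => decide (x < i)) ≤
        (occ 'L' e).countP (fun x => decide (x < i))) ∧
     (∀ i : Int, (occ 'R' e).countP (fun x => decide (x < i)) ≤
        (occ 'R' s).countP (fun x => decide (x < i)))) ↔
    (∀ m : Nat, ((s.take m).count 'L' : Int) ≤ ((e.take m).count 'L' : Int) ∧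
       ((e.take m).count 'R' : Int) ≤ ((s.take m).count 'R' : Int)) := by
  constructor
  · rintro ⟨hL, hR⟩ m
    have h1 := hL (m : Int)
    have h2 := hR (m : Int)
    rw [← count_take, ← count_take] at h1 h2
    exact ⟨by exact_mod_cast h1, by exact_mod_cast h2⟩
  · intro h
    constructor <;> intro i
    · by_cases hi : i ≤ 0
      · rw [countP_nonpos _ (occ_nonneg 'L' s) i hi]
        exact Nat.zero_le _
      · have hi' : i = ((i.toNat : Nat) : Int) := by omega
        rw [hi', ← count_take, ← count_take]
        exact_mod_cast (h i.toNat).1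
    · by_cases hi : i ≤ 0
      · rw [countP_nonpos _ (occ_nonneg 'R' e) i hi]
        exact Nat.zero_le _
      · have hi' : i = ((i.toNat : Nat) : Int) := by omega
        rw [hi', ← count_take, ← count_take]
        exact_mod_cast (h i.toNat).2

theorem main_eq (s e : List Char) (hlen : s.length = e.length)
    (hfil : s.filter (fun c => c != 'X') = e.filter (fun c => c != 'X')) :
    fB (pairsE s) (pairsE e) = loopB (s.zip e) 0 0 0 0 := by
  have hcL : s.count 'L' = e.count 'L' := by
    rw [← count_filter_ne 'L' (by decide) s, ← count_filter_ne 'L' (by decide) e, hfil]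
  have hcR : s.count 'R' = e.count 'R' := by
    rw [← count_filter_ne 'R' (by decide) s, ← count_filter_ne 'R' (by decide) e, hfil]
  have hsnd : (pairsE s).map Prod.snd = (pairsE e).map Prod.snd := by
    rw [snd_pairsE, snd_pairsE, hfil]
  have hLlen : (occ 'L' s).length = (occ 'L' e).length := by
    rw [occ_length, occ_length, hcL]
  have hRlen : (occ 'R' e).length = (occ 'R' s).length := by
    rw [occ_length, occ_length, hcR]
  -- A-side criterion in Int prefix-count form
  have hA : fB (pairsE s) (pairsE e) = true ↔
      ((∀ i : Int, (occ 'L' s).countP (fun x => decide (x < i)) ≤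
          (occ 'L' e).countP (fun x => decide (x < i))) ∧
       (∀ i : Int, (occ 'R' e).countP (fun x => decide (x < i)) ≤
          (occ 'R' s).countP (fun x => decide (x < i)))) := by
    rw [fB_iff_full, oc_pairsE 'L' (by decide) s, oc_pairsE 'L' (by decide) e,
      oc_pairsE 'R' (by decide) s, oc_pairsE 'R' (by decide) e]
    constructor
    · rintro ⟨-, hFL, hFR⟩
      exact ⟨fun i => forall₂_countP _ _ hFL i,
        fun i => forall₂_countP _ _ ((pvForall₂_swap _ _).mp hFR) i⟩
    · rintro ⟨hL, hR⟩
      exact ⟨hsnd,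
        countP_forall₂ _ _ (occ_pairwise 'L' s) (occ_pairwise 'L' e) hLlen hL,
        (pvForall₂_swap _ _).mpr
          (countP_forall₂ _ _ (occ_pairwise 'R' e) (occ_pairwise 'R' s) hRlen hR)⟩
  -- B-side loop in Nat prefix form
  have hB : loopB (s.zip e) 0 0 0 0 = true ↔
      (∀ m : Nat, ((s.take m).count 'L' : Int) ≤ ((e.take m).count 'L' : Int) ∧
         ((e.take m).count 'R' : Int) ≤ ((s.take m).count 'R' : Int)) := by
    rw [loopB_iff]
    have hmf : (s.zip e).map Prod.fst = s := List.map_fst_zip (by omega)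
    have hms : (s.zip e).map Prod.snd = e := List.map_snd_zip (by omega)
    have hlz : (s.zip e).length = s.length := by
      rw [List.length_zip]; omega
    constructor
    · intro h m
      cases m with
      | zero => simp
      | succ j =>
        by_cases hj : j < (s.zip e).length
        · have := h j hj
          rw [List.map_take, List.map_take, hmf, hms] at this
          simpa using this
        · have hns : s.take (j + 1) = s := List.take_of_length_le (by omega)
          have hne : e.take (j + 1) = e := List.take_of_length_le (by omega)
          rw [hns, hne]
          by_cases hn0 : s.length = 0
          · have hs0 : s = [] := List.eq_nil_of_length_eq_zero hn0
            have he0 : e = [] := List.eq_nil_of_length_eq_zero (by omega)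
            simp [hs0, he0]
          · have hk : s.length - 1 < (s.zip e).length := by omega
            have := h (s.length - 1) hk
            rw [List.map_take, List.map_take, hmf, hms] at this
            have hts : s.take (s.length - 1 + 1) = s := List.take_of_length_le (by omega)
            have hte : e.take (s.length - 1 + 1) = e := List.take_of_length_le (by omega)
            rw [hts, hte] at this
            simpa using this
    · intro h j hj
      rw [List.map_take, List.map_take, hmf, hms]
      have := h (j + 1)
      simpa using this
  have hiff := (hA.trans (intCond_iff_natCond s e hlen)).trans hB.symm
  cases hfB : fB (pairsE s) (pairsE e) <;> cases hlB : loopB (s.zip e) 0 0 0 0 <;> simp_all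

-- ===== VERDICT (by name: the statement is the Claim_ definition above) =====
theorem canTransform_spec : Claim_equal_canTransform := by
  intro start end_ _
  unfold Spec_canTransform canTransform canTransform_alt
  simp only []
  by_cases hlen : start.toList.length = end_.toList.length
  · rw [if_neg (by omega), if_neg (by omega)]
    rw [loopA_eq start.toList end_.toList start.toList.length rfl hlen 0 0
        (Nat.zero_le _) (Nat.zero_le _)]
    rw [pairsFrom_zero, pairsFrom_zero]
    by_cases hfil : start.toList.filter (fun c => c != 'X') =
        end_.toList.filter (fun c => c != 'X')
    · rw [if_neg (not_not_intro hfil)]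
      exact main_eq start.toList end_.toList hlen hfil
    · rw [if_pos hfil]
      cases hfB : fB (pairsE start.toList) (pairsE end_.toList)
      · rfl
      · exfalso
        have := (fB_iff_full _ _).mp hfB
        rw [snd_pairsE, snd_pairsE] at this
        exact hfil this.1
  · rw [if_pos (by omega), if_pos (by omega)]
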